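-- pv_equiv track=rewrite | github.com/alexandraback/datacollection | solutions_5644738749267968_1/Python/homuler/D.py | deceit_score
-- ===== SOURCE A (Python) =====
-- def deceit_score(mass1, mass2):
--     mass1.sort()
--     mass2.sort()
--     score = 0
--     while len(mass1) > 0:
--         if mass1[-1] < mass2[-1]:
--             mass1 = mass1[1:]
--             mass2 = mass2[:-1]
--         else:
--             score += 1
--             mass1 = mass1[:-1]
--             mass2 = mass2[:-1]
--     return score
-- ===== SOURCE B (Python) =====
-- def deceit_score(mass1, mass2):
--     mass1.sort()
--     mass2.sort()
--     score = 0
--     lo = 0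
--     hi = len(mass1) - 1
--     j = len(mass2) - 1
--     while lo <= hi:
--         if mass1[hi] >= mass2[j]:
--             score += 1
--             hi -= 1
--         else:
--             lo += 1
--         j -= 1
--     return score
-- ===== Notes on version B (the rewrite author's own statement) =====
-- stated objective: faster
-- what changed: A repeatedly slices both lists (mass1[1:], mass1[:-1], mass2[:-1]) inside the loop, copying O(n) per iteration; B sorts once and walks the same greedy with three integer indices (lo, hi into mass1, j into mass2) in one pass with no copying.
import Mathlib
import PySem

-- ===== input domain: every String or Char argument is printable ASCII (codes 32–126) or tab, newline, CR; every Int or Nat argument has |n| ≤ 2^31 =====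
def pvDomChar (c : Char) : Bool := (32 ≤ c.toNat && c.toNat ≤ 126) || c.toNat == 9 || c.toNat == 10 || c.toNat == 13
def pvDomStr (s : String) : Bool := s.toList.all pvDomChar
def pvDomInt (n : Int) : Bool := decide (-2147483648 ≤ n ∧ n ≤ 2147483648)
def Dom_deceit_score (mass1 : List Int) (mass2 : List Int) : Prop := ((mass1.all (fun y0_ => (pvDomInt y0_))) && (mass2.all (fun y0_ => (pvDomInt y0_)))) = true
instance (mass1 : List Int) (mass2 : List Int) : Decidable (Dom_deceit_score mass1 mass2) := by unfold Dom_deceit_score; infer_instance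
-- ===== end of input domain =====

-- B replaces A's quadratic slice-and-rebuild loop by a two-pointer single pass over the
-- sorted lists (objective: faster).  Both A and B sort their arguments in place (the same
-- side effect); the equivalence proved is about the return value.

-- ===== PORT A =====
-- A's while loop; fuel = mass1.length makes the recursion structural (each iteration
-- removes exactly one element of mass1, so the loop runs at most mass1.length times).
-- When mass2 is empty while mass1 is not, Python raises IndexError at mass2[-1]
-- (excluded by Pre_); the port returns the current score there.
def deceitLoopA : Nat → List Int → List Int → Int → Int
  | 0, _, _, score => score
  | fuel + 1, m1, m2, score =>
    if m1.length > 0 then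
      if m2.length > 0 then
        if PySem.List.pyGetD m1 (-1) 0 < PySem.List.pyGetD m2 (-1) 0 then
          deceitLoopA fuel (PySem.List.slice m1 (some 1) none) (PySem.List.slice m2 none (some (-1))) score
        else
          deceitLoopA fuel (PySem.List.slice m1 none (some (-1))) (PySem.List.slice m2 none (some (-1))) (score + 1)
      else score  -- Python: IndexError (outside Pre_)
    else score

def deceit_score (mass1 : List Int) (mass2 : List Int) : Int :=
  let s1 := PySem.List.sorted mass1 (fun x => x) false
  let s2 := PySem.List.sorted mass2 (fun x => x) false
  deceitLoopA s1.length s1 s2 0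

-- ===== PORT B =====
-- B's while loop: indices lo, hi into sorted mass1 and j into sorted mass2; fuel =
-- mass1.length makes it structural (hi - lo shrinks by one per iteration).
def deceitLoopB (s1 s2 : List Int) : Nat → Int → Int → Int → Int → Int
  | 0, _, _, _, score => score
  | fuel + 1, lo, hi, j, score =>
    if lo ≤ hi then
      if PySem.List.pyGetD s1 hi 0 ≥ PySem.List.pyGetD s2 j 0 then
        deceitLoopB s1 s2 fuel lo (hi - 1) (j - 1) (score + 1)
      else
        deceitLoopB s1 s2 fuel (lo + 1) hi (j - 1) score
    else score

def deceit_score_alt (mass1 : List Int) (mass2 : List Int) : Int :=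
  let s1 := PySem.List.sorted mass1 (fun x => x) false
  let s2 := PySem.List.sorted mass2 (fun x => x) false
  deceitLoopB s1 s2 s1.length 0 ((s1.length : Int) - 1) ((s2.length : Int) - 1) 0

-- ===== PRECONDITION & SPEC =====
-- Pre_ excludes exactly the inputs where A raises IndexError: a nonempty mass1 with
-- fewer elements in mass2 than in mass1 (mass2 runs out while the loop still runs).
def Pre_deceit_score (mass1 : List Int) (mass2 : List Int) : Prop :=
  mass1 = [] ∨ mass1.length ≤ mass2.length
instance (mass1 : List Int) (mass2 : List Int) : Decidable (Pre_deceit_score mass1 mass2) := by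
  unfold Pre_deceit_score; infer_instance

def pvWitness_deceit_score : List Int × List Int := ([3, 1, 7], [2, 8, 4])

def Spec_deceit_score (mass1 : List Int) (mass2 : List Int) (out : Int) : Prop := out = deceit_score_alt mass1 mass2
instance (mass1 : List Int) (mass2 : List Int) (out : Int) : Decidable (Spec_deceit_score mass1 mass2 out) := by unfold Spec_deceit_score; infer_instance

-- ===== CLAIM (what is proved, stated in full; the proofs are below) =====
def Claim_equal_deceit_score : Prop := ∀ (mass1 : List Int) (mass2 : List Int), Dom_deceit_score mass1 mass2 → Pre_deceit_score mass1 mass2 → Spec_deceit_score mass1 mass2 (deceit_score mass1 mass2)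

-- ===== LEMMAS AND PROOFS =====

-- Invariant: B's index loop on (lo = a, hi = a+n-1, j = m-1) with fuel n computes the
-- same value as A's slicing loop on the segments (s1.drop a).take n and s2.take m.
lemma loopB_eq_loopA (n : Nat) : ∀ (s1 s2 : List Int) (a m : Nat) (score : Int),
    a + n ≤ s1.length → n ≤ m → m ≤ s2.length →
    deceitLoopB s1 s2 n (a : Int) ((a : Int) + (n : Int) - 1) ((m : Int) - 1) score =
    deceitLoopA n ((s1.drop a).take n) (s2.take m) score := by
  induction n with
  | zero => intro s1 s2 a m score h1 h2 h3; rfl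
  | succ n ih =>
    intro s1 s2 a m score h1 h2 h3
    have hm1 : 1 ≤ m := by omega
    have hseg1len : ((s1.drop a).take (n + 1)).length = n + 1 := by
      simp; omega
    have hseg1ne : (s1.drop a).take (n + 1) ≠ [] := by
      intro h; rw [h] at hseg1len; simp at hseg1len
    have hseg2len : (s2.take m).length = m := by simp; omega
    have hseg2ne : s2.take m ≠ [] := by
      intro h; rw [h] at hseg2len; simp at hseg2len; omega
    -- the two last elements
    have ha : a + n < s1.length := by omega
    have hj : m - 1 < s2.length := by omega
    have hlast1 : ((s1.drop a).take (n + 1)).getLast hseg1ne = s1[a + n] := by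
      rw [List.getLast_eq_getElem]
      simp [hseg1len]
    have hlast2 : (s2.take m).getLast hseg2ne = s2[m - 1] := by
      rw [List.getLast_eq_getElem]
      simp [hseg2len]
    have hB1 : PySem.List.pyGetD s1 ((a : Int) + (n + 1 : Nat) - 1) 0 = s1[a + n] := by
      have : ((a : Int) + ((n : Nat) + 1 : Nat) - 1) = ((a + n : Nat) : Int) := by push_cast; ring
      rw [this, PySem.List.pyGetD_natCast]
      exact List.getD_eq_getElem _ _ ha
    have hB2 : PySem.List.pyGetD s2 ((m : Int) - 1) 0 = s2[m - 1] := by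
      have : ((m : Int) - 1) = ((m - 1 : Nat) : Int) := by omega
      rw [this, PySem.List.pyGetD_natCast]
      exact List.getD_eq_getElem _ _ hj
    have hA1 : PySem.List.pyGetD ((s1.drop a).take (n + 1)) (-1) 0 = s1[a + n] := by
      rw [PySem.List.pyGetD_neg_one _ _ hseg1ne, hlast1]
    have hA2 : PySem.List.pyGetD (s2.take m) (-1) 0 = s2[m - 1] := by
      rw [PySem.List.pyGetD_neg_one _ _ hseg2ne, hlast2]
    -- segment-shrinking equations
    have hshrink1a : PySem.List.slice ((s1.drop a).take (n + 1)) (some 1) none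
        = (s1.drop (a + 1)).take n := by
      rw [PySem.List.slice_from_one, ← List.drop_one, List.drop_take, List.drop_drop]
      simp
    have hshrink1b : PySem.List.slice ((s1.drop a).take (n + 1)) none (some (-1))
        = (s1.drop a).take n := by
      rw [PySem.List.slice_to_neg_one, List.dropLast_eq_take, hseg1len]
      simp [List.take_take]
    have hshrink2 : PySem.List.slice (s2.take m) none (some (-1)) = s2.take (m - 1) := by
      rw [PySem.List.slice_to_neg_one, List.dropLast_eq_take, hseg2len]
      simp [List.take_take]
    have hcond : ((a : Int) ≤ (a : Int) + ((n : Nat) + 1 : Nat) - 1) := by push_cast; omega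
    rw [deceitLoopB, deceitLoopA]
    rw [if_pos hcond, if_pos (show ((s1.drop a).take (n + 1)).length > 0 by omega)]
    rw [if_pos (show (s2.take m).length > 0 by omega)]
    rw [hA1, hA2, hB1, hB2]
    by_cases hlt : s1[a + n] < s2[m - 1]
    · rw [if_neg (by omega), if_pos hlt, hshrink1a, hshrink2]
      have e1 : ((a : Int) + 1) = ((a + 1 : Nat) : Int) := by push_cast; ring
      have e2 : ((a : Int) + ((n : Nat) + 1 : Nat) - 1) = ((a + 1 : Nat) : Int) + (n : Int) - 1 := by
        push_cast; ring
      have e3 : ((m : Int) - 1 - 1) = ((m - 1 : Nat) : Int) - 1 := by omega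
      rw [e1, e2, e3]
      exact ih s1 s2 (a + 1) (m - 1) score (by omega) (by omega) (by omega)
    · rw [if_pos (by omega), if_neg hlt, hshrink1b, hshrink2]
      have e2 : ((a : Int) + ((n : Nat) + 1 : Nat) - 1 - 1) = (a : Int) + (n : Int) - 1 := by
        push_cast; ring
      have e3 : ((m : Int) - 1 - 1) = ((m - 1 : Nat) : Int) - 1 := by omega
      rw [e2, e3]
      exact ih s1 s2 a (m - 1) (score + 1) (by omega) (by omega) (by omega)

-- ===== VERDICT (by name: the statement is the Claim_ definition above) =====
theorem deceit_score_spec : Claim_equal_deceit_score := by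
  intro mass1 mass2 _ hpre
  unfold Spec_deceit_score deceit_score deceit_score_alt
  set s1 := PySem.List.sorted mass1 (fun x => x) false with hs1
  set s2 := PySem.List.sorted mass2 (fun x => x) false with hs2
  have hlen1 : s1.length = mass1.length := PySem.List.length_sorted ..
  have hlen2 : s2.length = mass2.length := PySem.List.length_sorted ..
  have hle : s1.length ≤ s2.length ∨ s1.length = 0 := by
    rcases hpre with h | h
    · right; rw [hlen1, h]; rfl
    · left; omega
  rcases hle with h | h
  · have := loopB_eq_loopA s1.length s1 s2 0 s2.length 0 (by omega) h (le_refl _)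
    simp only [Nat.cast_zero, zero_add, List.drop_zero, List.take_length] at this
    rw [← this]
  · show deceitLoopA s1.length s1 s2 0
        = deceitLoopB s1 s2 s1.length 0 ((s1.length : Int) - 1) ((s2.length : Int) - 1) 0
    rw [h]; rfl
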